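-- pv_equiv track=rewrite | github.com/sumitparw/leetcode_practise | pure storage/pure-storage_computer_score.py | compute_number_score
-- ===== SOURCE A (Python) =====
-- def compute_number_score(number):
--     number_score =0
--     prev =False
--     seq_length = 1
--     remainder_prev = -10
--     if int(number%3==0):
--         number_score +=4
--     while number>0:
--         remainder = int(number%10)
--         number = int(number/10)
--         if remainder == 7:
--             number_score +=5
--         if remainder%2 ==0:
--             number_score+=3
--         if remainder ==2 and prev == True:
--             number_score +=6
--         if remainder ==2:
--             prev =True
--         else:
--             prev = False
--         if remainder_prev == -10:
--             remainder_prev = remainder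
--         else:
--             if remainder == remainder_prev + 1:
--                 seq_length += 1
--                 remainder_prev = remainder
--             else:
--                 number_score += seq_length * seq_length
--                 seq_length = 1
--                 remainder_prev = remainder
--     if seq_length > 1:
--         number_score += seq_length*seq_length
--     return number_score
-- ===== SOURCE B (Python) =====
-- def compute_number_score(number):
--     bonus = 4 if number % 3 == 0 else 0
--     digits = []
--     while number > 0:
--         digits.append(int(number % 10))
--         number = int(number / 10)
--     points = sum(5 * (d == 7) + 3 * (d % 2 == 0) for d in digits)
--     pairs = 6 * sum(1 for x, y in zip(digits, digits[1:]) if x == 2 and y == 2)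
--     run = 0
--     seq = 1
--     for x, y in zip(digits, digits[1:]):
--         if y == x + 1:
--             seq += 1
--         else:
--             run += seq * seq
--             seq = 1
--     if seq > 1:
--         run += seq * seq
--     return bonus + points + pairs + run
-- ===== Notes on version B (the rewrite author's own statement) =====
-- stated objective: alternative
-- what changed: A's single interleaved loop with sentinel/flag state is replaced by extracting the digit list once and computing each scoring rule in its own independent pass: a per-digit points sum, an adjacent-2-pair count over zipped neighbours, and a separate increasing-run scan, plus the mod-3 bonus computed up front.
import Mathlib
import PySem

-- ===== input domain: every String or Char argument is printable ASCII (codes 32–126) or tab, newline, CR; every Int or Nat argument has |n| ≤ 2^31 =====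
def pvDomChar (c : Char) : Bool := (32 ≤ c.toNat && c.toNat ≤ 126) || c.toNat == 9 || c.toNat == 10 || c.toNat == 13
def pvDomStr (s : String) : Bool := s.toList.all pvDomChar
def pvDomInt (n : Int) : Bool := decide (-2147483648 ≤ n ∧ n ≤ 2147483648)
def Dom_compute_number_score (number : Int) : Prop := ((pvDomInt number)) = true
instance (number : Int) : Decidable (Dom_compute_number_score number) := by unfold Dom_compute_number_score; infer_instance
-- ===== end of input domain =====

-- B re-implements A's single interleaved digit loop as digit extraction plus independent
-- scoring passes (per-digit points, adjacent-2 pairs, increasing-run scan); alternative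
-- decomposition, same cost.

-- termination helper for both digit loops (int(number/10) strictly shrinks a positive number)
theorem pvTruncdiv10_lt (a : Int) (ha : 0 < a) : (PySem.Int.truncdiv a 10).toNat < a.toNat := by
  have he : PySem.Int.truncdiv a 10 = PySem.Int.floordiv a 10 := by
    simp [PySem.Int.truncdiv, PySem.Int.floordiv, Int.tdiv_eq_ediv, Int.fdiv_eq_ediv, le_of_lt ha]
  have h1 := PySem.Int.floordiv_lt_iff_lt_mul (a := a) (b := 10) (q := a) (by omega)
  have h2 := PySem.Int.le_floordiv_iff_mul_le (a := a) (b := 10) (q := 0) (by omega)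
  omega

-- ===== PORT A =====
-- the while loop; the trailing `if seq_length > 1` of A runs at loop exit.
-- int(number/10) is ported as PySem.Int.truncdiv (exact for |number| ≤ 2^31 < 2^53);
-- int(number%10) is PySem.Int.mod (already an int in Python).
def compute_number_score_loop (number number_score : Int) (prev : Bool)
    (seq_length remainder_prev : Int) : Int :=
  if h : number > 0 then
    let remainder : Int := PySem.Int.mod number 10
    let number' : Int := PySem.Int.truncdiv number 10
    let s1 : Int := if remainder = 7 then number_score + 5 else number_score
    let s2 : Int := if PySem.Int.mod remainder 2 = 0 then s1 + 3 else s1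
    let s3 : Int := if remainder = 2 ∧ prev = true then s2 + 6 else s2
    let prev' : Bool := decide (remainder = 2)
    if remainder_prev = -10 then
      compute_number_score_loop number' s3 prev' seq_length remainder
    else if remainder = remainder_prev + 1 then
      compute_number_score_loop number' s3 prev' (seq_length + 1) remainder
    else
      compute_number_score_loop number' (s3 + seq_length * seq_length) prev' 1 remainder
  else
    if seq_length > 1 then number_score + seq_length * seq_length else number_score
termination_by number.toNat
decreasing_by all_goals exact pvTruncdiv10_lt number h

def compute_number_score (number : Int) : Int :=
  let number_score : Int := if PySem.Int.mod number 3 = 0 then 0 + 4 else 0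
  compute_number_score_loop number number_score false 1 (-10)

-- ===== PORT B =====
-- digits of the number, least significant first (same arithmetic as A's extraction)
def pvDigits (number : Int) : List Int :=
  if h : number > 0 then
    PySem.Int.mod number 10 :: pvDigits (PySem.Int.truncdiv number 10)
  else []
termination_by number.toNat
decreasing_by exact pvTruncdiv10_lt number h

-- per-digit points: 5*(d==7) + 3*(d%2==0)
def pvPoint (d : Int) : Int :=
  5 * (if d = 7 then 1 else 0) + 3 * (if PySem.Int.mod d 2 = 0 then 1 else 0)

def compute_number_score_alt (number : Int) : Int :=
  let bonus : Int := if PySem.Int.mod number 3 = 0 then 4 else 0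
  let digits := pvDigits number
  let points : Int := (digits.map pvPoint).sum
  let pairs : Int := 6 * ((digits.zip digits.tail).countP fun p => p.1 == 2 && p.2 == 2 : Nat)
  let rs : Int × Int := (digits.zip digits.tail).foldl
      (fun st p => if p.2 = p.1 + 1 then (st.1, st.2 + 1) else (st.1 + st.2 * st.2, 1)) (0, 1)
  let run : Int := if rs.2 > 1 then rs.1 + rs.2 * rs.2 else rs.1
  bonus + points + pairs + run

-- ===== PRECONDITION & SPEC =====
def Spec_compute_number_score (number : Int) (out : Int) : Prop := out = compute_number_score_alt number
instance (number : Int) (out : Int) : Decidable (Spec_compute_number_score number out) := by unfold Spec_compute_number_score; infer_instance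

-- ===== CLAIM (what is proved, stated in full; the proofs are below) =====
def Claim_equal_compute_number_score : Prop := ∀ (number : Int), Dom_compute_number_score number → Spec_compute_number_score number (compute_number_score number)

-- ===== LEMMAS AND PROOFS =====

-- A's loop replayed over the digit list (same body, list instead of repeated division)
def pvListLoop : List Int → Int → Bool → Int → Int → Int
  | [], number_score, _, seq_length, _ =>
      if seq_length > 1 then number_score + seq_length * seq_length else number_score
  | d :: ds, number_score, prev, seq_length, remainder_prev =>
      let s1 : Int := if d = 7 then number_score + 5 else number_score
      let s2 : Int := if PySem.Int.mod d 2 = 0 then s1 + 3 else s1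
      let s3 : Int := if d = 2 ∧ prev = true then s2 + 6 else s2
      let prev' : Bool := decide (d = 2)
      if remainder_prev = -10 then
        pvListLoop ds s3 prev' seq_length d
      else if d = remainder_prev + 1 then
        pvListLoop ds s3 prev' (seq_length + 1) d
      else
        pvListLoop ds (s3 + seq_length * seq_length) prev' 1 d

-- "previous digit" context: none at the start, some r after digit r
def pvRp : Option Int → Int
  | none => -10
  | some r => r

-- adjacent-2 pair count of the digit stream, given the previous digit
def pvPair2 : Option Int → List Int → Nat
  | _, [] => 0
  | c, d :: ds => (if c = some 2 ∧ d = 2 then 1 else 0) + pvPair2 (some d) ds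

-- increasing-run bonus of the digit stream, given the previous digit and current run length
def pvRun : Option Int → Int → List Int → Int
  | _, q, [] => if q > 1 then q * q else 0
  | none, q, d :: ds => pvRun (some d) q ds
  | some r, q, d :: ds =>
      if d = r + 1 then pvRun (some d) (q + 1) ds else q * q + pvRun (some d) 1 ds

theorem pvDigits_nonneg (number : Int) : ∀ d ∈ pvDigits number, 0 ≤ d := by
  fun_induction pvDigits number with
  | case1 n h ih =>
    intro d hd
    rcases List.mem_cons.mp hd with hd | hd
    · exact hd ▸ PySem.Int.mod_nonneg n (by omega)
    · exact ih d hd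
  | case2 n h => intro d hd; simp at hd

theorem loop_eq_listLoop (number number_score : Int) (prev : Bool)
    (seq_length remainder_prev : Int) :
    compute_number_score_loop number number_score prev seq_length remainder_prev
      = pvListLoop (pvDigits number) number_score prev seq_length remainder_prev := by
  fun_induction compute_number_score_loop number number_score prev seq_length remainder_prev with
  | case1 n s p q hpos r n' s1 s2 s3 pr ih =>
    rw [ih]; conv_rhs => rw [pvDigits, dif_pos hpos]; simp only [pvListLoop]; rw [if_true]
    rfl
  | case2 n s p q rp hpos r n' s1 s2 s3 pr hrp hstep ih =>
    rw [ih]; conv_rhs => rw [pvDigits, dif_pos hpos]; simp only [pvListLoop]; rw [if_neg hrp, if_pos hstep]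
    rfl
  | case3 n s p q rp hpos r n' s1 s2 s3 pr hrp hstep ih =>
    rw [ih]; conv_rhs => rw [pvDigits, dif_pos hpos]; simp only [pvListLoop]; rw [if_neg hrp, if_neg hstep]
    rfl
  | case4 n s p q rp hneg hq =>
    conv_rhs => rw [pvDigits, dif_neg hneg]; simp only [pvListLoop]; rw [if_pos hq]
  | case5 n s p q rp hneg hq =>
    conv_rhs => rw [pvDigits, dif_neg hneg]; simp only [pvListLoop]; rw [if_neg hq]

theorem listLoop_char (ds : List Int) :
    ∀ (c : Option Int) (s q : Int), (∀ d ∈ ds, 0 ≤ d) → (∀ r, c = some r → 0 ≤ r) →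
    pvListLoop ds s (decide (c = some 2)) q (pvRp c)
      = s + (ds.map pvPoint).sum + 6 * (pvPair2 c ds : Int) + pvRun c q ds := by
  induction ds with
  | nil =>
    intro c s q _ _
    simp only [pvListLoop, pvRun, pvPair2, List.map_nil, List.sum_nil]
    split <;> ring
  | cons d ds ih =>
    intro c s q hds hc
    have hd0 : 0 ≤ d := hds d (by simp)
    have hds' : ∀ x ∈ ds, 0 ≤ x := fun x hx => hds x (by simp [hx])
    have hc' : ∀ r, (some d : Option Int) = some r → 0 ≤ r := by intro r hr; cases hr; exact hd0
    have ih' := fun s q => ih (some d) s q hds' hc'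
    simp only [pvRp, Option.some.injEq] at ih'
    cases c with
    | none =>
      simp only [pvListLoop, pvRp, pvPair2, pvRun, List.map_cons, List.sum_cons, pvPoint]
      rw [if_true, ih']
      have e1 : (decide ((none : Option Int) = some 2)) = false := rfl
      have e2 : ((none : Option Int) = some 2 ∧ d = 2) = False := by simp
      simp only [e1, e2, Bool.false_eq_true, and_false, if_false]
      split_ifs <;> first | (exfalso; tauto) | (push_cast; ring)
    | some r =>
      have hr0 : 0 ≤ r := hc r rfl
      simp only [pvListLoop, pvRp, pvPair2, pvRun, List.map_cons, List.sum_cons, pvPoint]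
      rw [if_neg (by omega : ¬ r = -10)]
      have e1 : (decide ((some r : Option Int) = some 2)) = decide (r = 2) := by simp
      have e2 : ((some r : Option Int) = some 2 ∧ d = 2) = (d = 2 ∧ decide (r = 2) = true) := by
        simp only [Option.some.injEq, decide_eq_true_eq]; exact propext and_comm
      by_cases hstep : d = r + 1
      · rw [if_pos hstep, if_pos hstep, e1, ih']; simp only [e2]
        split_ifs <;> first | (exfalso; tauto) | (push_cast; ring)
      · rw [if_neg hstep, if_neg hstep, e1, ih']; simp only [e2]
        split_ifs <;> first | (exfalso; tauto) | (push_cast; ring)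

theorem countP_eq_pair2 (ds : List Int) :
    ∀ r : Int, (((r :: ds).zip ds).countP fun p => p.1 == 2 && p.2 == 2) = pvPair2 (some r) ds := by
  induction ds with
  | nil => intro r; simp [pvPair2]
  | cons d t ih =>
    intro r
    simp only [List.zip_cons_cons, List.countP_cons, pvPair2, ih d]
    by_cases h2 : r = 2 ∧ d = 2 <;> simp_all <;> omega

theorem foldl_eq_run (ds : List Int) :
    ∀ (r run q : Int),
    (let st := ((r :: ds).zip ds).foldl
        (fun st p => if p.2 = p.1 + 1 then (st.1, st.2 + 1) else (st.1 + st.2 * st.2, 1)) (run, q)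
     if st.2 > 1 then st.1 + st.2 * st.2 else st.1)
      = run + pvRun (some r) q ds := by
  induction ds with
  | nil => intro r run q; simp only [List.zip_nil_right, List.foldl_nil, pvRun]; split <;> ring
  | cons d t ih =>
    intro r run q
    simp only [List.zip_cons_cons, List.foldl_cons, pvRun]
    by_cases hstep : d = r + 1
    · rw [if_pos hstep, if_pos hstep]; exact ih d run (q + 1)
    · rw [if_neg hstep, if_neg hstep]
      have := ih d (run + q * q) 1
      simp only at this ⊢
      rw [this]; ring

-- ===== VERDICT (by name: the statement is the Claim_ definition above) =====
theorem compute_number_score_spec : Claim_equal_compute_number_score := by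
  intro number _
  unfold Spec_compute_number_score compute_number_score compute_number_score_alt
  rw [loop_eq_listLoop]
  have hnone : ∀ r : Int, (none : Option Int) = some r → 0 ≤ r := by intro r hr; cases hr
  have hchar := listLoop_char (pvDigits number) none
      (if PySem.Int.mod number 3 = 0 then 0 + 4 else 0) 1 (pvDigits_nonneg number) hnone
  have efalse : (decide ((none : Option Int) = some 2)) = false := rfl
  rw [efalse, show pvRp none = (-10 : Int) from rfl] at hchar
  rw [hchar]
  cases hds : pvDigits number with
  | nil => simp [pvPair2, pvRun]
  | cons d t =>
    have hrun := foldl_eq_run t d 0 1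
    simp only [List.tail_cons, pvPair2, pvRun, countP_eq_pair2 t d] at *
    rw [hrun]
    simp only [List.map_cons, List.sum_cons, pvPoint]
    split_ifs <;> first | (exfalso; tauto) | (push_cast; ring)
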